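-- pv_equiv track=rewrite | github.com/Antonio-demo/Sketch_based_FL_GC | mlp-mnist/models/Fed.py | Creat_Hadmard
-- ===== SOURCE A (Python) =====
-- def Creat_Hadmard(i=4, j=4):
-- 	'哈达玛矩阵的维数是2的幂次方，2^(a) 如(2,4,8,16...)'
-- 	temp = i & j
-- 	result = 0
-- 	for step in range(4):
-- 		result += ((temp >> step) & 1)
-- 	if 0 == result % 2:
-- 		sign = 1
-- 	else:
-- 		sign = -1
-- 	return sign
-- ===== SOURCE B (Python) =====
-- def Creat_Hadmard(i=4, j=4):
--     t = (i & j) & 0xF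
--     t ^= t >> 2
--     t ^= t >> 1
--     return 1 if (t & 1) == 0 else -1
-- ===== Notes on version B (the rewrite author's own statement) =====
-- stated objective: alternative
-- what changed: Replaces the 4-step bit-counting loop plus modulo test with a branch-free XOR parity fold on the 4 masked bits (t ^= t>>2; t ^= t>>1; test t&1).
import Mathlib
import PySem

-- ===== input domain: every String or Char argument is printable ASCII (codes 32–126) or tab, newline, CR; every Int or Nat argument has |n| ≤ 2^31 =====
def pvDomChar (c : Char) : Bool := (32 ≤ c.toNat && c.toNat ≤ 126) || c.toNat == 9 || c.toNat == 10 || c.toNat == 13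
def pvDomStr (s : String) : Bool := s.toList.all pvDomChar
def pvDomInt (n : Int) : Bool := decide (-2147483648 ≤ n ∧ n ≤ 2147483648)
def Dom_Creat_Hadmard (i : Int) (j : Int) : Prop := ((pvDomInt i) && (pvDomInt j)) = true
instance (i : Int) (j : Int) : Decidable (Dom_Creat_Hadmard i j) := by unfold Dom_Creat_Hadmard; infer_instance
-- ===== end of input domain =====

-- ===== PORT A =====
-- Port of A: sums the 4 low bits of i & j with a loop and tests the sum's parity.
def Creat_Hadmard (i : Int) (j : Int) : Int :=
  let temp := PySem.Int.band i j
  let result := (PySem.List.pyRange 0 4 1).foldl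
    (fun result step => result + PySem.Int.band (temp >>> step.toNat) 1) 0
  if (0 : Int) == PySem.Int.mod result 2 then 1 else -1

-- ===== PORT B =====
-- B: branch-free XOR parity fold on the 4 masked bits (alternative decomposition, same cost).
def Creat_Hadmard_alt (i : Int) (j : Int) : Int :=
  let t0 := PySem.Int.band (PySem.Int.band i j) 15
  let t1 := PySem.Int.bxor t0 (t0 >>> (2 : Nat))
  let t2 := PySem.Int.bxor t1 (t1 >>> (1 : Nat))
  if PySem.Int.band t2 1 == (0 : Int) then 1 else -1

-- ===== PRECONDITION & SPEC =====
def Spec_Creat_Hadmard (i : Int) (j : Int) (out : Int) : Prop := out = Creat_Hadmard_alt i j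
instance (i : Int) (j : Int) (out : Int) : Decidable (Spec_Creat_Hadmard i j out) := by unfold Spec_Creat_Hadmard; infer_instance

-- ===== CLAIM (what is proved, stated in full; the proofs are below) =====
def Claim_equal_Creat_Hadmard : Prop := ∀ (i : Int) (j : Int), Dom_Creat_Hadmard i j → Spec_Creat_Hadmard i j (Creat_Hadmard i j)

-- ===== LEMMAS AND PROOFS =====

theorem band_fifteen (t : Int) : PySem.Int.band t 15 = t % 16 := by
  unfold PySem.Int.band
  have h15 : ∀ n : Nat, n &&& 15 = n % 16 := fun n => by
    have := Nat.and_two_pow_sub_one_eq_mod n 4; norm_num at this; exact this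
  have e15 : Int.toNat 15 = 15 := rfl
  split
  · rw [e15, h15]; rename_i h; omega
  · rename_i h
    rw [if_pos (show (0:Int) ≤ 15 by norm_num), e15, Nat.and_comm, h15]
    omega
theorem core_eq (t : Int) :
    (if (0 : Int) == PySem.Int.mod ((PySem.List.pyRange 0 4 1).foldl
        (fun result step => result + PySem.Int.band (t >>> step.toNat) 1) 0) 2 then (1:Int) else -1)
    = (let t0 := PySem.Int.band t 15
       let t1 := PySem.Int.bxor t0 (t0 >>> (2 : Nat))
       let t2 := PySem.Int.bxor t1 (t1 >>> (1 : Nat))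
       if PySem.Int.band t2 1 == (0 : Int) then (1:Int) else -1) := by
  have hrange : PySem.List.pyRange 0 4 1 = [0, 1, 2, 3] := by decide
  rw [hrange]
  simp only [List.foldl, PySem.Int.band_one, band_fifteen, beq_iff_eq,
    PySem.Int.mod_eq_emod_of_pos (show (0:Int) < 2 by norm_num),
    show Int.toNat 0 = 0 from rfl, show Int.toNat 1 = 1 from rfl,
    show Int.toNat 2 = 2 from rfl, show Int.toNat 3 = 3 from rfl,
    Int.shiftRight_natCast_right, Int.shiftRight_eq_div_pow]
  push_cast
  obtain ⟨r, hr, hlo, hhi⟩ : ∃ r, t % 16 = r ∧ 0 ≤ r ∧ r < 16 :=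
    ⟨t % 16, rfl, by omega, by omega⟩
  rw [hr]
  have h0 : t / 1 % 2 = r % 2 := by omega
  have h1 : t / 2 % 2 = r / 2 % 2 := by omega
  have h2 : t / 4 % 2 = r / 4 % 2 := by omega
  have h3 : t / 8 % 2 = r / 8 % 2 := by omega
  rw [h0, h1, h2, h3]
  interval_cases r <;> decide

-- ===== VERDICT (by name: the statement is the Claim_ definition above) =====
theorem Creat_Hadmard_spec : Claim_equal_Creat_Hadmard := by
  intro i j _
  unfold Spec_Creat_Hadmard Creat_Hadmard Creat_Hadmard_alt
  exact core_eq (PySem.Int.band i j)
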